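-- pv_equiv track=rewrite | github.com/prography-6th-study/algorithm-code | yongmin/LV3_예산.py | solution
-- ===== SOURCE A (Python) =====
-- def solution(budgets, M):
--     answer = 0
--     # 상한액은 1 ~ 각 지역 요청의 최대값 사이
--     low, high = 1, max(budgets)
--
--     # 이분탐색으로 상한액 찾기
--     while low <= high:
--         mid = (low + high) // 2 # 예산 상한액
--         total = 0 # 예산 총합
--
--         # mid를 상한액으로 설정하고 예산총합을 계산
--         for budget in budgets:
--             if budget < mid:
--                 total += budget
--             else:
--                 total += mid
--
--         # 조건을 만족한다면 mid 이상의 범위에서 다시 찾는다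
--         if total < M:
--             low = mid + 1
--             answer = mid
--         else: # 조건을 만족하지 못하면 mid 이하의 범위에서 다시 찾는다
--             high = mid - 1
--
--     return answer
-- ===== SOURCE B (Python) =====
-- def solution(budgets, M):
--     # Sort + prefix-sum scan: one pass over the sorted budgets instead of a
--     # binary search on the cap, each candidate cap read off by floor division.
--     bs = sorted(budgets)
--     n = len(bs)
--     cap = bs[-1]                      # like A's max(budgets): raises on empty
--     if sum(bs) < M:
--         return max(cap, 0)
--     best = 0
--     prefix = 0
--     for i in range(n):
--         c = (M - 1 - prefix) // (n - i)
--         if c > best: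
--             best = c
--         prefix += bs[i]
--     return best
-- ===== Notes on version B (the rewrite author's own statement) =====
-- stated objective: faster
-- what changed: Replaces A's binary search over the cap (each probe recomputing the capped sum with a Python-level loop over all budgets, ~31 passes for 2^31-bounded inputs) by one sort plus a single prefix-sum pass that reads the best feasible cap per split index off a floor division.
import Mathlib
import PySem

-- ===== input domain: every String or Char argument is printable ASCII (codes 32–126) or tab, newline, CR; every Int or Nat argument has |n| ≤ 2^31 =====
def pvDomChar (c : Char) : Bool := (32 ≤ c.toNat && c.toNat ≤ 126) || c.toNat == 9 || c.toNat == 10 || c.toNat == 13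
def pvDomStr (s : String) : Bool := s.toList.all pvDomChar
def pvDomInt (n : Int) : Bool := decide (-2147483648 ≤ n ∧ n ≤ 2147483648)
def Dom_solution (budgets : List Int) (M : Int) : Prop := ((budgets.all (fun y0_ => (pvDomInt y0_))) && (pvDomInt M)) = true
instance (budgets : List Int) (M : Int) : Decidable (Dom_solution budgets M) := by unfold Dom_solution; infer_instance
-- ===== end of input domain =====

-- B replaces A's binary search on the cap by one sort + prefix-sum scan that reads each
-- candidate cap off a floor division (objective: alternative algorithm, same exact result).

-- ===== PORT A =====
-- A's inner for-loop: total = sum over budgets of (budget if budget < mid else mid)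
def capSum (budgets : List Int) (mid : Int) : Int :=
  budgets.foldl (fun t b => t + if b < mid then b else mid) 0

-- A's while-loop (binary search); terminates because mid stays within [low, high]
def loopA (budgets : List Int) (M low high answer : Int) : Int :=
  if h : low ≤ high then
    let mid := PySem.Int.floordiv (low + high) 2
    if capSum budgets mid < M then
      loopA budgets M (mid + 1) high mid
    else
      loopA budgets M low (mid - 1) answer
  else answer
termination_by (high + 1 - low).toNat
decreasing_by
  · have := PySem.Int.floordiv_two_mid_bounds h; omega
  · have := PySem.Int.floordiv_two_mid_bounds h; omega

def solution (budgets : List Int) (M : Int) : Int :=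
  loopA budgets M 1 ((PySem.List.max? budgets (fun x => x)).getD 0) 0

-- ===== PORT B =====
-- B's for-loop over range(n): candidate cap per split, running max, running prefix sum
def bestLoop (M n : Int) (i pre best : Int) : List Int → Int
  | [] => best
  | b :: rest =>
      let c := PySem.Int.floordiv (M - 1 - pre) (n - i)
      bestLoop M n (i + 1) (pre + b) (if c > best then c else best) rest

def solution_alt (budgets : List Int) (M : Int) : Int :=
  let bs := PySem.List.sorted budgets (fun x => x) false
  let n : Int := bs.length
  let cap := (PySem.List.pyGet? bs (-1)).getD 0   -- bs[-1]; the empty list is excluded by Pre_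
  if bs.sum < M then max cap 0
  else bestLoop M n 0 0 0 bs

-- ===== PRECONDITION & SPEC =====
-- Pre_ excludes only the empty list, on which A's max(budgets) raises ValueError (and B's bs[-1] raises IndexError).
def Pre_solution (budgets : List Int) (M : Int) : Prop := budgets ≠ []
instance (budgets : List Int) (M : Int) : Decidable (Pre_solution budgets M) := by unfold Pre_solution; infer_instance
def pvWitness_solution : List Int × Int := ([5, 3, 7], 12)

def Spec_solution (budgets : List Int) (M : Int) (out : Int) : Prop := out = solution_alt budgets M
instance (budgets : List Int) (M : Int) (out : Int) : Decidable (Spec_solution budgets M out) := by unfold Spec_solution; infer_instance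

-- ===== CLAIM (what is proved, stated in full; the proofs are below) =====
def Claim_equal_solution : Prop := ∀ (budgets : List Int) (M : Int), Dom_solution budgets M → Pre_solution budgets M → Spec_solution budgets M (solution budgets M)

-- ===== LEMMAS AND PROOFS =====

-- `okAns budgets M mx c` : c is an acceptable answer (0, or a feasible cap in [1, mx]).
-- Both programs return the greatest such c; that is the common specification proved below.
def okAns (budgets : List Int) (M mx c : Int) : Prop :=
  c = 0 ∨ (1 ≤ c ∧ c ≤ mx ∧ capSum budgets c < M)

-- B's candidate cap at split index j
def cand (bs : List Int) (M : Int) (j : Nat) : Int :=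
  PySem.Int.floordiv (M - 1 - (bs.take j).sum) ((bs.length : Int) - j)

theorem capSum_eq_sum_min (bs : List Int) (c : Int) :
    capSum bs c = (bs.map (fun b => min b c)).sum := by
  unfold capSum
  rw [PySem.List.foldl_add bs (fun b => if b < c then b else c) 0]
  simp only [zero_add]
  congr 1
  apply List.map_congr_left
  intro b _
  by_cases h : b < c
  · simp [h]; omega
  · simp [h]; omega

theorem capSum_mono (bs : List Int) {c c' : Int} (h : c ≤ c') :
    capSum bs c ≤ capSum bs c' := by
  rw [capSum_eq_sum_min, capSum_eq_sum_min]
  induction bs with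
  | nil => simp
  | cons b t ih => simp only [List.map_cons, List.sum_cons]; exact add_le_add (min_le_min le_rfl h) ih

theorem capSum_le_sum (bs : List Int) (c : Int) : capSum bs c ≤ bs.sum := by
  rw [capSum_eq_sum_min]
  induction bs with
  | nil => simp
  | cons b t ih => simp only [List.map_cons, List.sum_cons]; exact add_le_add (min_le_left _ _) ih

theorem capSum_perm {bs bs' : List Int} (h : bs.Perm bs') (c : Int) :
    capSum bs c = capSum bs' c := by
  rw [capSum_eq_sum_min, capSum_eq_sum_min]
  exact (h.map _).sum_eq

theorem capSum_of_all_le {bs : List Int} {c : Int} (h : ∀ b ∈ bs, b ≤ c) :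
    capSum bs c = bs.sum := by
  rw [capSum_eq_sum_min]
  rw [List.map_congr_left (g := fun b => b) (fun b hb => min_eq_left (h b hb)), List.map_id']

theorem capSum_append_le (t d : List Int) (c : Int) :
    capSum (t ++ d) c ≤ t.sum + (d.length : Int) * c := by
  rw [capSum_eq_sum_min, List.map_append, List.sum_append]
  have h1 : ((t.map fun b => min b c)).sum ≤ t.sum := by
    rw [← capSum_eq_sum_min]; exact capSum_le_sum t c
  have h2 : ((d.map fun b => min b c)).sum ≤ (d.length : Int) * c := by
    induction d with
    | nil => simp
    | cons b r ih =>
      simp only [List.map_cons, List.sum_cons, List.length_cons]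
      push_cast
      have := min_le_right b c
      linarith
  linarith

theorem capSum_split {t d : List Int} {c : Int}
    (ht : ∀ b ∈ t, b ≤ c) (hd : ∀ b ∈ d, c < b) :
    capSum (t ++ d) c = t.sum + (d.length : Int) * c := by
  rw [capSum_eq_sum_min, List.map_append, List.sum_append]
  rw [List.map_congr_left (g := fun b => b) (fun b hb => min_eq_left (ht b hb)), List.map_id']
  rw [List.map_congr_left (g := fun _ => c) (fun b hb => min_eq_right (hd b hb).le)]
  rw [PySem.List.sum_map_const_int]

theorem bestLoop_ge_best (M n : Int) :
    ∀ (l : List Int) (i p best : Int), best ≤ bestLoop M n i p best l := by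
  intro l
  induction l with
  | nil => intro i p best; simp [bestLoop]
  | cons b rest ih =>
    intro i p best
    simp only [bestLoop]
    exact le_trans (by split_ifs <;> omega) (ih (i+1) (p+b) _)

theorem bestLoop_ge_cand (M n : Int) :
    ∀ (l : List Int) (i p best : Int) (j : Nat), j < l.length →
      PySem.Int.floordiv (M - 1 - (p + (l.take j).sum)) (n - (i + j)) ≤ bestLoop M n i p best l := by
  intro l
  induction l with
  | nil => intro i p best j hj; simp at hj
  | cons b rest ih =>
    intro i p best j hj
    match j with
    | 0 =>
      simp only [List.take_zero, List.sum_nil, add_zero, Nat.cast_zero, bestLoop]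
      exact le_trans (by split_ifs <;> omega) (bestLoop_ge_best M n rest (i+1) (p+b) _)
    | Nat.succ j' =>
      simp only [List.take_succ_cons, List.sum_cons, bestLoop]
      have h2 := ih (i+1) (p+b)
        (if PySem.Int.floordiv (M - 1 - p) (n - i) > best then PySem.Int.floordiv (M - 1 - p) (n - i) else best)
        j' (by simpa using hj)
      rw [show p + (b + (rest.take j').sum) = (p + b) + (rest.take j').sum by ring]
      push_cast
      rw [show n - (i + ((j' : Int) + 1)) = n - ((i + 1) + j') by ring]
      exact h2

theorem bestLoop_mem (M n : Int) :
    ∀ (l : List Int) (i p best : Int),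
      bestLoop M n i p best l = best ∨
      ∃ j : Nat, j < l.length ∧
        bestLoop M n i p best l = PySem.Int.floordiv (M - 1 - (p + (l.take j).sum)) (n - (i + j)) := by
  intro l
  induction l with
  | nil => intro i p best; left; simp [bestLoop]
  | cons b rest ih =>
    intro i p best
    simp only [bestLoop]
    rcases ih (i+1) (p+b)
        (if PySem.Int.floordiv (M - 1 - p) (n - i) > best then PySem.Int.floordiv (M - 1 - p) (n - i) else best)
      with h | ⟨j, hj, h⟩
    · by_cases hc : PySem.Int.floordiv (M - 1 - p) (n - i) > best
      · right; exact ⟨0, by simp, by rw [h, if_pos hc]; simp⟩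
      · left; rw [h, if_neg hc]
    · right
      refine ⟨j + 1, by simpa using hj, ?_⟩
      rw [h]
      congr 1
      · simp; ring
      · push_cast; ring

theorem cand_feasible (bs : List Int) (M : Int) (j : Nat) (hj : j < bs.length) :
    capSum bs (cand bs M j) < M := by
  have hpos : (0 : Int) < (bs.length : Int) - j := by omega
  have hle : cand bs M j * ((bs.length : Int) - j) ≤ M - 1 - (bs.take j).sum :=
    (PySem.Int.le_floordiv_iff_mul_le hpos).mp le_rfl
  have hsplit := capSum_append_le (bs.take j) (bs.drop j) (cand bs M j)
  rw [List.take_append_drop] at hsplit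
  have hlen : ((bs.drop j).length : Int) = (bs.length : Int) - j := by
    rw [List.length_drop]; omega
  rw [hlen] at hsplit
  nlinarith [hsplit, hle]

theorem sorted_dropWhile_gt : ∀ {bs : List Int} {c : Int}, bs.Pairwise (· ≤ ·) →
    ∀ b ∈ bs.dropWhile (fun b => decide (b ≤ c)), c < b := by
  intro bs
  induction bs with
  | nil => intro c _ b hb; simp at hb
  | cons x rest ih =>
    intro c hsort b hb
    rw [List.dropWhile_cons] at hb
    by_cases hx : x ≤ c
    · simp only [hx, decide_true, if_true] at hb
      exact ih (List.pairwise_cons.mp hsort).2 b hb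
    · simp only [hx, decide_false] at hb
      rcases List.mem_cons.mp hb with rfl | hb
      · omega
      · have := (List.pairwise_cons.mp hsort).1 b hb; omega

theorem feasible_le_cand {bs : List Int} {M c : Int}
    (hsort : bs.Pairwise (· ≤ ·)) (htot : M ≤ bs.sum) (hc : capSum bs c < M) :
    ∃ j : Nat, j < bs.length ∧ c ≤ cand bs M j := by
  have ht : ∀ b ∈ bs.takeWhile (fun b => decide (b ≤ c)), b ≤ c := by
    intro b hb; simpa using List.mem_takeWhile_imp hb
  have hd := sorted_dropWhile_gt hsort (c := c)
  set a := bs.takeWhile (fun b => decide (b ≤ c)) with ha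
  set d := bs.dropWhile (fun b => decide (b ≤ c)) with hddef
  clear_value a d
  have htd : a ++ d = bs := by rw [ha, hddef]; exact List.takeWhile_append_dropWhile
  have hdne : d ≠ [] := by
    intro hdnil
    rw [hdnil, List.append_nil] at htd
    rw [← htd, capSum_of_all_le (by intro b hb; exact ht b hb)] at hc
    rw [← htd] at htot
    omega
  have hcap : capSum bs c = a.sum + (d.length : Int) * c := by
    conv_lhs => rw [← htd]
    exact capSum_split ht hd
  have hlensum : a.length + d.length = bs.length := by
    have := congrArg List.length htd
    simpa using this
  have hdpos : 0 < d.length := List.length_pos_iff.mpr hdne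
  refine ⟨a.length, by omega, ?_⟩
  have htake : bs.take a.length = a := by
    conv_lhs => rw [← htd]
    exact List.take_left
  rw [cand, htake, PySem.Int.le_floordiv_iff_mul_le (by omega)]
  rw [hcap] at hc
  have hdl : (d.length : Int) = (bs.length : Int) - a.length := by omega
  rw [hdl] at hc
  nlinarith [hc]

theorem loopA_spec (budgets : List Int) (M mx : Int) :
    ∀ (fuel : Nat) (low high answer : Int), (high + 1 - low).toNat ≤ fuel →
      1 ≤ low → answer = low - 1 → high ≤ mx →
      okAns budgets M mx answer → (∀ c, okAns budgets M mx c → c ≤ max high answer) →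
      okAns budgets M mx (loopA budgets M low high answer) ∧
        ∀ c, okAns budgets M mx c → c ≤ loopA budgets M low high answer := by
  intro fuel
  induction fuel with
  | zero =>
    intro low high answer hf h1 h2 h3 hok hub
    have hlh : ¬ low ≤ high := by omega
    rw [loopA, dif_neg hlh]
    refine ⟨hok, fun c hc => ?_⟩
    have := hub c hc
    omega
  | succ f ih =>
    intro low high answer hf h1 h2 h3 hok hub
    by_cases hlh : low ≤ high
    · rw [loopA, dif_pos hlh]
      have hmid := PySem.Int.floordiv_two_mid_bounds hlh
      set mid := PySem.Int.floordiv (low + high) 2 with hmiddef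
      by_cases hfeas : capSum budgets mid < M
      · simp only [hfeas, if_true]
        apply ih (mid + 1) high mid (by omega) (by omega) (by omega) h3
        · exact Or.inr ⟨by omega, by omega, hfeas⟩
        · intro c hc
          have := hub c hc
          omega
      · simp only [hfeas, if_false]
        apply ih low (mid - 1) answer (by omega) h1 h2 (by omega) hok
        intro c hc
        have h4 := hub c hc
        rcases hc with rfl | ⟨hc1, hc2, hc3⟩
        · omega
        · by_cases hcm : mid ≤ c
          · exact absurd (lt_of_le_of_lt (capSum_mono budgets hcm) hc3) hfeas
          · omega
    · rw [loopA, dif_neg hlh]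
      refine ⟨hok, fun c hc => ?_⟩
      have := hub c hc
      omega

-- the max? value is the last element of the sorted list
theorem max_eq_last (budgets : List Int) (hne : budgets ≠ []) :
    (PySem.List.max? budgets (fun x => x)).getD 0
      = (PySem.List.pyGet? (PySem.List.sorted budgets (fun x => x) false) (-1)).getD 0 := by
  obtain ⟨m, hm⟩ : ∃ m, PySem.List.max? budgets (fun x => x) = some m := by
    cases h : PySem.List.max? budgets (fun x => x) with
    | none => exact absurd ((PySem.List.max?_eq_none_iff _ _).mp h) hne
    | some m => exact ⟨m, rfl⟩
  set bs := PySem.List.sorted budgets (fun x => x) false with hbs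
  have hbsne : bs ≠ [] := by simpa [hbs, PySem.List.sorted_eq_nil_iff] using hne
  rw [hm, PySem.List.pyGet?_neg_one, List.getLast?_eq_some_getLast hbsne]
  simp only [Option.getD_some]
  have hlast_mem : bs.getLast hbsne ∈ budgets :=
    (PySem.List.mem_sorted _ _ _ _).mp (List.getLast_mem hbsne)
  have h1 : bs.getLast hbsne ≤ m := PySem.List.max?_isMax hm _ hlast_mem
  have h2 : m ≤ bs.getLast hbsne := by
    have hmmem : m ∈ bs := (PySem.List.mem_sorted _ _ _ _).mpr (PySem.List.max?_mem hm)
    obtain ⟨p, hp, hpm⟩ := List.mem_iff_getElem.mp hmmem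
    have hlen : 0 < bs.length := List.length_pos_iff.mpr hbsne
    rw [List.getLast_eq_getElem hbsne, ← hpm]
    exact PySem.List.sorted_id_getElem_mono budgets (p := p) (q := bs.length - 1)
      (by omega) (by rw [← hbs]; omega)
  omega

theorem solution_alt_spec (budgets : List Int) (M mx : Int)
    (hne : budgets ≠ [])
    (hmx : (PySem.List.max? budgets (fun x => x)).getD 0 = mx) :
    okAns budgets M mx (solution_alt budgets M) ∧
      ∀ c, okAns budgets M mx c → c ≤ solution_alt budgets M := by
  obtain ⟨m, hm⟩ : ∃ m, PySem.List.max? budgets (fun x => x) = some m := by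
    cases h : PySem.List.max? budgets (fun x => x) with
    | none => exact absurd ((PySem.List.max?_eq_none_iff _ _).mp h) hne
    | some m => exact ⟨m, rfl⟩
  have hmval : m = mx := by rw [hm] at hmx; simpa using hmx
  subst hmval
  have hmax : ∀ b ∈ budgets, b ≤ m := fun b hb => PySem.List.max?_isMax hm b hb
  set bs := PySem.List.sorted budgets (fun x => x) false with hbs
  have hperm : bs.Perm budgets := PySem.List.sorted_perm _ _ _
  have hsum : bs.sum = budgets.sum := hperm.sum_eq
  have hcap : ∀ c, capSum budgets c = capSum bs c := fun c => capSum_perm hperm.symm c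
  have hbsne : bs ≠ [] := by simpa [hbs, PySem.List.sorted_eq_nil_iff] using hne
  have hsort : bs.Pairwise (· ≤ ·) := PySem.List.sorted_pairwise budgets (fun x => x)
  have hcapm : capSum budgets m = budgets.sum := capSum_of_all_le hmax
  unfold solution_alt
  rw [← hbs]
  by_cases htot : bs.sum < M
  · simp only [if_pos htot]
    rw [← max_eq_last budgets hne, hmx]
    constructor
    · by_cases h1 : 1 ≤ m
      · rw [max_eq_left (by omega)]
        refine Or.inr ⟨by omega, le_rfl, ?_⟩
        calc capSum budgets m ≤ budgets.sum := capSum_le_sum _ _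
          _ < M := by omega
      · rw [max_eq_right (by omega)]; left; rfl
    · intro c hc
      rcases hc with rfl | ⟨hc1, hc2, _⟩ <;> omega
  · simp only [if_neg htot]
    have htot' : M ≤ bs.sum := by omega
    have hr0 : (0 : Int) ≤ bestLoop M (bs.length : Int) 0 0 0 bs := bestLoop_ge_best _ _ _ _ _ _
    have hcand_le : ∀ j : Nat, j < bs.length → cand bs M j ≤ bestLoop M (bs.length : Int) 0 0 0 bs := by
      intro j hj
      have := bestLoop_ge_cand M (bs.length : Int) bs 0 0 0 j hj
      simpa [cand] using this
    constructor
    · rcases bestLoop_mem M (bs.length : Int) bs 0 0 0 with h | ⟨j, hj, h⟩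
      · left; exact h
      · have hval : bestLoop M (bs.length : Int) 0 0 0 bs = cand bs M j := by
          simpa [cand] using h
        by_cases hz : bestLoop M (bs.length : Int) 0 0 0 bs = 0
        · left; exact hz
        · have hfj : capSum budgets (cand bs M j) < M := by
            rw [hcap]; exact cand_feasible bs M j hj
          refine Or.inr ⟨by omega, ?_, by rw [hval]; exact hfj⟩
          by_contra hgt
          have hmcand : m ≤ cand bs M j := by omega
          have hmono := capSum_mono budgets hmcand
          omega
    · intro c hc
      rcases hc with rfl | ⟨hc1, hc2, hc3⟩
      · exact hr0
      · rw [hcap] at hc3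
        obtain ⟨j, hj, hcj⟩ := feasible_le_cand hsort htot' hc3
        exact le_trans hcj (hcand_le j hj)

-- ===== VERDICT (by name: the statement is the Claim_ definition above) =====
theorem solution_spec : Claim_equal_solution := by
  intro budgets M _hdom hpre
  unfold Spec_solution solution
  have hA := loopA_spec budgets M ((PySem.List.max? budgets (fun x => x)).getD 0)
      (((PySem.List.max? budgets (fun x => x)).getD 0 + 1 - 1).toNat + 1) 1
      ((PySem.List.max? budgets (fun x => x)).getD 0) 0 (by omega) le_rfl (by norm_num) le_rfl
      (Or.inl rfl) (by intro c hc; rcases hc with rfl | ⟨h1, h2, _⟩ <;> omega)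
  have hB := solution_alt_spec budgets M ((PySem.List.max? budgets (fun x => x)).getD 0) hpre rfl
  exact le_antisymm (hB.2 _ hA.1) (hA.2 _ hB.1)
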